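-- pv_equiv track=rewrite | github.com/Julia-vibecoder/Greekbot | scripts/redistribute_abstract.py | parse_themes
-- ===== SOURCE A (Python) =====
-- def parse_themes(rows):
--     """
--     Parse rows into ordered list of (theme_name, [entry_rows]).
--     Separator rows have greek='---' and russian=theme_name.
--     """
--     themes = []
--     current_theme = None
--     current_entries = []
--     for row in rows:
--         if row["greek"] == "---":
--             if current_theme is not None:
--                 themes.append((current_theme, current_entries))
--             current_theme = row["russian"]
--             current_entries = []
--         else:
--             current_entries.append(row)
--     # Last theme
--     if current_theme is not None:
--         themes.append((current_theme, current_entries))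
--     return themes
-- ===== SOURCE B (Python) =====
-- def parse_themes(rows):
--     """
--     Parse rows into ordered list of (theme_name, [entry_rows]).
--     Scan-by-index: at each separator, scan forward to the next separator
--     and slice out the entry block; rows before the first separator are skipped.
--     """
--     out = []
--     i = 0
--     n = len(rows)
--     while i < n:
--         if rows[i]["greek"] == "---":
--             j = i + 1
--             while j < n and rows[j]["greek"] != "---":
--                 j += 1
--             out.append((rows[i]["russian"], rows[i + 1:j]))
--             i = j
--         else:
--             i += 1
--     return out
-- ===== Notes on version B (the rewrite author's own statement) =====
-- stated objective: alternative
-- what changed: B replaces A's running accumulator state (current_theme/current_entries flushed at each separator and at the end) with an index scan that, at each separator, scans forward to the next separator and slices out the entry block directly.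
import Mathlib
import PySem

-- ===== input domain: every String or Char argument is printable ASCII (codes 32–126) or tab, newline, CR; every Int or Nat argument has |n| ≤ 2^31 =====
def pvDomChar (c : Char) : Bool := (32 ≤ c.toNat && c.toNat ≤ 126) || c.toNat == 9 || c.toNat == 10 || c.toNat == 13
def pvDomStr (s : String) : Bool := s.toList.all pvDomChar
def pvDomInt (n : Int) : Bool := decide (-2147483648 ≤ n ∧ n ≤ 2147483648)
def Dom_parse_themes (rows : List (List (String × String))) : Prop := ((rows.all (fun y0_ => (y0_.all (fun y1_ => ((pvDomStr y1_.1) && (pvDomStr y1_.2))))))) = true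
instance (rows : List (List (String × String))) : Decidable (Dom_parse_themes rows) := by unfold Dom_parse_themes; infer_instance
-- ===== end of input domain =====

-- B replaces A's running accumulator state with an index/slice scan: at each separator,
-- scan forward to the next separator and cut out the entry block directly (objective: alternative).

-- row["greek"] / row["russian"]: first-match association-list lookup, totalized with "";
-- Pre_parse_themes guarantees the key is present wherever the Python reads it.
def pvGetKey (r : List (String × String)) (k : String) : String :=
  ((PySem.Dict.mk r).get? k).getD ""

-- ===== PORT A =====
-- A's loop state: (themes, current_theme, current_entries), flushed at separators and at the end.
def parseAStep (st : List (String × List (List (String × String))) × Option String × List (List (String × String)))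
    (row : List (String × String)) :
    List (String × List (List (String × String))) × Option String × List (List (String × String)) :=
  let (themes, cur, ents) := st
  if pvGetKey row "greek" = "---" then
    ((match cur with
      | some t => themes ++ [(t, ents)]
      | none => themes), some (pvGetKey row "russian"), [])
  else
    (themes, cur, ents ++ [row])

def parse_themes (rows : List (List (String × String))) : List (String × (List (List (String × String)))) :=
  let st := rows.foldl parseAStep ([], none, [])
  match st.2.1 with
  | some t => st.1 ++ [(t, st.2.2)]
  | none => st.1

-- ===== PORT B =====
-- entry row = not a separator (B's inner scan condition)
def pvIsEntry (r : List (String × String)) : Bool := pvGetKey r "greek" ≠ "---"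

-- B's outer while-loop: skip entry rows; at a separator, the inner scan to the next
-- separator is takeWhile/dropWhile on the remaining rows (the slice rows[i+1:j]).
def parseAltGo : List (List (String × String)) → List (String × (List (List (String × String))))
  | [] => []
  | r :: rest =>
    if pvIsEntry r then
      parseAltGo rest
    else
      (pvGetKey r "russian", rest.takeWhile pvIsEntry) :: parseAltGo (rest.dropWhile pvIsEntry)
termination_by rows => rows.length
decreasing_by
  all_goals have := List.length_dropWhile_le pvIsEntry rest
  all_goals simp
  all_goals omega

def parse_themes_alt (rows : List (List (String × String))) : List (String × (List (List (String × String)))) :=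
  parseAltGo rows

-- ===== PRECONDITION & SPEC =====
-- Exactly the inputs on which Python A returns (no KeyError): every row has a "greek" key,
-- and every separator row additionally has a "russian" key.
def Pre_parse_themes (rows : List (List (String × String))) : Prop :=
  ∀ r ∈ rows, ((PySem.Dict.mk r).get? "greek").isSome = true ∧
    (pvGetKey r "greek" = "---" → ((PySem.Dict.mk r).get? "russian").isSome = true)
instance (rows : List (List (String × String))) : Decidable (Pre_parse_themes rows) := by
  unfold Pre_parse_themes; infer_instance

def pvWitness_parse_themes : (List (List (String × String))) :=
  [[("greek", "---"), ("russian", "Animals")],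
   [("greek", "gata"), ("russian", "cat")],
   [("greek", "skylos"), ("russian", "dog")],
   [("greek", "---"), ("russian", "Food")],
   [("greek", "psomi"), ("russian", "bread")]]

def Spec_parse_themes (rows : List (List (String × String))) (out : List (String × (List (List (String × String))))) : Prop := out = parse_themes_alt rows
instance (rows : List (List (String × String))) (out : List (String × (List (List (String × String))))) : Decidable (Spec_parse_themes rows out) := by unfold Spec_parse_themes; infer_instance

-- ===== CLAIM (what is proved, stated in full; the proofs are below) =====
def Claim_equal_parse_themes : Prop := ∀ (rows : List (List (String × String))), Dom_parse_themes rows → Pre_parse_themes rows → Spec_parse_themes rows (parse_themes rows)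

-- ===== LEMMAS AND PROOFS =====

theorem parseAltGo_cons_entry (r : List (String × String)) (rest : List (List (String × String)))
    (h : pvIsEntry r = true) : parseAltGo (r :: rest) = parseAltGo rest := by
  rw [parseAltGo.eq_def]; simp [h]

theorem parseAltGo_cons_sep (r : List (String × String)) (rest : List (List (String × String)))
    (h : pvIsEntry r = false) :
    parseAltGo (r :: rest) =
      (pvGetKey r "russian", rest.takeWhile pvIsEntry) :: parseAltGo (rest.dropWhile pvIsEntry) := by
  have hg : pvGetKey r "greek" = "---" := by simpa [pvIsEntry] using h
  rw [parseAltGo.eq_def]; simp [hg, pvIsEntry]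

-- Finalisation of A's loop state (the post-loop flush).
def parseAFin (st : List (String × List (List (String × String))) × Option String × List (List (String × String))) :
    List (String × (List (List (String × String)))) :=
  match st.2.1 with
  | some t => st.1 ++ [(t, st.2.2)]
  | none => st.1

-- Invariant while a theme is open: the finalised fold equals the emitted themes, then the open
-- theme completed by the entries up to the next separator, then B's parse of the remainder.
theorem parseA_some (rows : List (List (String × String))) :
    ∀ (themes : List (String × List (List (String × String)))) (t : String)
      (ents : List (List (String × String))),
    parseAFin (rows.foldl parseAStep (themes, some t, ents)) =
      themes ++ (t, ents ++ rows.takeWhile pvIsEntry) :: parseAltGo (rows.dropWhile pvIsEntry) := by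
  induction rows with
  | nil => intro themes t ents; simp [parseAFin, parseAltGo]
  | cons r rest ih =>
    intro themes t ents
    by_cases h : pvIsEntry r
    · have hg : ¬ pvGetKey r "greek" = "---" := by
        simpa [pvIsEntry] using h
      simp only [List.foldl_cons, parseAStep, if_neg hg, List.takeWhile_cons, h,
        List.dropWhile_cons, ih]
      simp
    · have hg : pvGetKey r "greek" = "---" := by
        simpa [pvIsEntry] using h
      have h' : pvIsEntry r = false := by simpa using h
      simp only [List.foldl_cons, parseAStep, if_pos hg, ih,
        List.takeWhile_cons, List.dropWhile_cons, h']
      simp only [Bool.false_eq_true, if_false]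
      rw [parseAltGo_cons_sep r rest h']
      simp

-- Before the first separator: entries are discarded and the fold reduces to B on the tail.
theorem parseA_none (rows : List (List (String × String))) :
    ∀ (themes : List (String × List (List (String × String))))
      (ents : List (List (String × String))),
    parseAFin (rows.foldl parseAStep (themes, none, ents)) = themes ++ parseAltGo rows := by
  induction rows with
  | nil => intro themes ents; simp [parseAFin, parseAltGo]
  | cons r rest ih =>
    intro themes ents
    by_cases h : pvIsEntry r
    · have hg : ¬ pvGetKey r "greek" = "---" := by simpa [pvIsEntry] using h
      rw [parseAltGo_cons_entry r rest h]
      simp only [List.foldl_cons, parseAStep, if_neg hg, ih]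
    · have hg : pvGetKey r "greek" = "---" := by simpa [pvIsEntry] using h
      have h' : pvIsEntry r = false := by simpa using h
      rw [parseAltGo_cons_sep r rest h']
      simp only [List.foldl_cons, parseAStep, if_pos hg, parseA_some]
      simp

-- ===== VERDICT (by name: the statement is the Claim_ definition above) =====
theorem parse_themes_spec : Claim_equal_parse_themes := by
  intro rows _ _
  show parse_themes rows = parse_themes_alt rows
  have := parseA_none rows [] []
  simpa [parse_themes, parseAFin, parse_themes_alt] using this
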